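-- pv_equiv track=rewrite | github.com/Bobstin/AdventOfCode | 2021/19/19.py | check_for_transformed_scanner_overlap
-- ===== SOURCE A (Python) =====
-- def shift_scanner(
--     scanner: list[tuple[int, int, int]], shift: list[int]
-- ) -> list[tuple[int, int, int]]:
--     result = []
--     for ping in scanner:
--         new_ping = (ping[0] + shift[0], ping[1] + shift[1], ping[2] + shift[2])
--         result.append(new_ping)
--
--     return result
--
-- def check_for_transformed_scanner_overlap(
--     scanner_1: list[tuple[int, int, int]], scanner_2: list[tuple[int, int, int]]
-- ) -> tuple[list[int], list[tuple[int, int, int]]] | tuple[None, None]: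
--     for ping_1 in scanner_1:
--         for ping_2 in scanner_2:
--             delta = [
--                 ping_1[0] - ping_2[0],
--                 ping_1[1] - ping_2[1],
--                 ping_1[2] - ping_2[2],
--             ]
--             shifted_scanner_2 = shift_scanner(scanner_2, delta)
--             if len(set(scanner_1) & set(shifted_scanner_2)) >= 12:
--                 return delta, shifted_scanner_2
--
--     return None, None
-- ===== SOURCE B (Python) =====
-- def check_for_transformed_scanner_overlap(scanner_1, scanner_2):
--     # Count, over distinct points, how many pairs (p, q) share each delta p - q:
--     # that count equals |set(scanner_1) & set(scanner_2 shifted by delta)|.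
--     s1d = list(dict.fromkeys(scanner_1))
--     s2d = list(dict.fromkeys(scanner_2))
--     counts = {}
--     deltas = [(p[0] - q[0], p[1] - q[1], p[2] - q[2]) for p in s1d for q in s2d]
--     for d in deltas:
--         counts[d] = counts.get(d, 0) + 1
--     for ping_1 in scanner_1:
--         for ping_2 in scanner_2:
--             d = (ping_1[0] - ping_2[0], ping_1[1] - ping_2[1], ping_1[2] - ping_2[2])
--             if counts.get(d, 0) >= 12:
--                 return [d[0], d[1], d[2]], [
--                     (q[0] + d[0], q[1] + d[1], q[2] + d[2]) for q in scanner_2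
--                 ]
--     return None, None
-- ===== Notes on version B (the rewrite author's own statement) =====
-- stated objective: faster
-- what changed: Instead of rebuilding and intersecting a shifted point set for every pair (O(n) set work per pair, O(n^3) total), B counts each delta of the distinct-point pairs once in a hash map (that count equals the overlap size) and then scans the pairs with an O(1) lookup.
import Mathlib
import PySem

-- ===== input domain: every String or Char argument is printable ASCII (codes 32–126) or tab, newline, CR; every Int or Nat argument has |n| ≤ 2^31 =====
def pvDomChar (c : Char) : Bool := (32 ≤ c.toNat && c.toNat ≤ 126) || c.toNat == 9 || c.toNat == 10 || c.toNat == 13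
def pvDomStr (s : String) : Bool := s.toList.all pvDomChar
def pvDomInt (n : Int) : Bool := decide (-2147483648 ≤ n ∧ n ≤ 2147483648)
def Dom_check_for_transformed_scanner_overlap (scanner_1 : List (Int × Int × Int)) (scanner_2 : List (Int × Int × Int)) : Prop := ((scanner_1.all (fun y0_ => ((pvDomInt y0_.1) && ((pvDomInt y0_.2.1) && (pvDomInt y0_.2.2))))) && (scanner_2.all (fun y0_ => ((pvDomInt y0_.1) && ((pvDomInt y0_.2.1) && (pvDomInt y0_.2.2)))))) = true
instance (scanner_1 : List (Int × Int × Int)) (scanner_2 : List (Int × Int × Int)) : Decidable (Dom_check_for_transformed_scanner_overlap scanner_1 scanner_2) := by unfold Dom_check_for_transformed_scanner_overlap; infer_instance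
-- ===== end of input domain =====

-- B replaces A's O(n^3) scan (rebuild + intersect a shifted set for every pair) by one
-- O(n^2) delta counter over the distinct points, then an O(1) lookup per pair.

-- ===== PORT A =====
def shift_scanner (scanner : List (Int × Int × Int)) (shift : List Int) : List (Int × Int × Int) :=
  scanner.foldl (fun result ping =>
    result ++ [(ping.1 + PySem.List.pyGetD shift 0 0,
                ping.2.1 + PySem.List.pyGetD shift 1 0,
                ping.2.2 + PySem.List.pyGetD shift 2 0)]) []

def chkA_inner (scanner_1 scanner_2 : List (Int × Int × Int)) (ping_1 : Int × Int × Int) :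
    List (Int × Int × Int) → Option (List Int × List (Int × Int × Int))
  | [] => none
  | ping_2 :: rest =>
    let delta : List Int := [ping_1.1 - ping_2.1, ping_1.2.1 - ping_2.2.1, ping_1.2.2 - ping_2.2.2]
    let shifted_scanner_2 := shift_scanner scanner_2 delta
    if 12 ≤ PySem.Set.len (PySem.Set.inter (PySem.Set.ofList scanner_1) (PySem.Set.ofList shifted_scanner_2))
    then some (delta, shifted_scanner_2)
    else chkA_inner scanner_1 scanner_2 ping_1 rest

def chkA_outer (scanner_1 scanner_2 : List (Int × Int × Int)) :
    List (Int × Int × Int) → Option (List Int × List (Int × Int × Int))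
  | [] => none
  | ping_1 :: rest =>
    match chkA_inner scanner_1 scanner_2 ping_1 scanner_2 with
    | some r => some r
    | none => chkA_outer scanner_1 scanner_2 rest

def check_for_transformed_scanner_overlap (scanner_1 : List (Int × Int × Int)) (scanner_2 : List (Int × Int × Int)) : Option (List Int) × (Option (List (Int × Int × Int))) :=
  match chkA_outer scanner_1 scanner_2 scanner_1 with
  | some (delta, shifted) => (some delta, some shifted)
  | none => (none, none)

-- ===== PORT B =====
def deltaOf (p q : Int × Int × Int) : Int × Int × Int :=
  (p.1 - q.1, p.2.1 - q.2.1, p.2.2 - q.2.2)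

def delta_counts (scanner_1 scanner_2 : List (Int × Int × Int)) : PySem.Dict (Int × Int × Int) Int :=
  ((PySem.Set.ofList scanner_1).flatMap
      (fun p => (PySem.Set.ofList scanner_2).map (fun q => deltaOf p q))).foldl
    (fun counts d => counts.insert d (counts.getD d 0 + 1)) PySem.Dict.empty

def chkB_inner (counts : PySem.Dict (Int × Int × Int) Int) (scanner_2 : List (Int × Int × Int))
    (ping_1 : Int × Int × Int) :
    List (Int × Int × Int) → Option (List Int × List (Int × Int × Int))
  | [] => none
  | ping_2 :: rest =>
    let d := deltaOf ping_1 ping_2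
    if 12 ≤ counts.getD d 0 then
      some ([d.1, d.2.1, d.2.2],
            scanner_2.map (fun q => (q.1 + d.1, q.2.1 + d.2.1, q.2.2 + d.2.2)))
    else chkB_inner counts scanner_2 ping_1 rest

def chkB_outer (counts : PySem.Dict (Int × Int × Int) Int) (scanner_2 : List (Int × Int × Int)) :
    List (Int × Int × Int) → Option (List Int × List (Int × Int × Int))
  | [] => none
  | ping_1 :: rest =>
    match chkB_inner counts scanner_2 ping_1 scanner_2 with
    | some r => some r
    | none => chkB_outer counts scanner_2 rest

def check_for_transformed_scanner_overlap_alt (scanner_1 : List (Int × Int × Int)) (scanner_2 : List (Int × Int × Int)) : Option (List Int) × (Option (List (Int × Int × Int))) :=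
  let counts := delta_counts scanner_1 scanner_2
  match chkB_outer counts scanner_2 scanner_1 with
  | some (delta, shifted) => (some delta, some shifted)
  | none => (none, none)

-- ===== PRECONDITION & SPEC =====
def Spec_check_for_transformed_scanner_overlap (scanner_1 : List (Int × Int × Int)) (scanner_2 : List (Int × Int × Int)) (out : Option (List Int) × (Option (List (Int × Int × Int)))) : Prop := out = check_for_transformed_scanner_overlap_alt scanner_1 scanner_2
instance (scanner_1 : List (Int × Int × Int)) (scanner_2 : List (Int × Int × Int)) (out : Option (List Int) × (Option (List (Int × Int × Int)))) : Decidable (Spec_check_for_transformed_scanner_overlap scanner_1 scanner_2 out) := by unfold Spec_check_for_transformed_scanner_overlap; infer_instance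

-- ===== CLAIM (what is proved, stated in full; the proofs are below) =====
def Claim_equal_check_for_transformed_scanner_overlap : Prop := ∀ (scanner_1 : List (Int × Int × Int)) (scanner_2 : List (Int × Int × Int)), Dom_check_for_transformed_scanner_overlap scanner_1 scanner_2 → Spec_check_for_transformed_scanner_overlap scanner_1 scanner_2 (check_for_transformed_scanner_overlap scanner_1 scanner_2)

-- ===== LEMMAS AND PROOFS =====

-- A's shift_scanner on a literal 3-element shift is a map.
lemma shift_scanner_eq_map (s : List (Int × Int × Int)) (a b c : Int) :
    shift_scanner s [a, b, c] = s.map (fun q => (q.1 + a, q.2.1 + b, q.2.2 + c)) := by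
  unfold shift_scanner
  rw [PySem.List.foldl_append_singleton_eq_map]
  simp [PySem.List.pyGetD]

-- counting one point's deltas against a duplicate-free list: 1 if p - d occurs, else 0
lemma count_map_delta (p d : Int × Int × Int) (s2 : List (Int × Int × Int)) (h2 : s2.Nodup) :
    (s2.map (fun q => deltaOf p q)).count d
      = if (p.1 - d.1, p.2.1 - d.2.1, p.2.2 - d.2.2) ∈ s2 then 1 else 0 := by
  rw [List.count, List.countP_map]
  have hfun : ((fun x => x == d) ∘ fun q => deltaOf p q)
      = fun q => q == (p.1 - d.1, p.2.1 - d.2.1, p.2.2 - d.2.2) := by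
    funext q
    rw [Bool.eq_iff_iff]
    simp only [Function.comp, beq_iff_eq]
    unfold deltaOf
    obtain ⟨x, y, z⟩ := q
    obtain ⟨dx, dy, dz⟩ := d
    obtain ⟨px, py, pz⟩ := p
    simp only [Prod.mk.injEq]
    omega
  rw [hfun]
  have hc : List.countP (fun q => q == (p.1 - d.1, p.2.1 - d.2.1, p.2.2 - d.2.2)) s2
      = s2.count (p.1 - d.1, p.2.1 - d.2.1, p.2.2 - d.2.2) := rfl
  rw [hc]
  by_cases h : (p.1 - d.1, p.2.1 - d.2.1, p.2.2 - d.2.2) ∈ s2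
  · rw [if_pos h]
    exact List.count_eq_one_of_mem h2 h
  · rw [if_neg h]
    exact List.count_eq_zero_of_not_mem h

-- count of a delta in the flatMap of all distinct pairs
lemma count_flatMap_delta (s2d : List (Int × Int × Int)) (h2 : s2d.Nodup)
    (d : Int × Int × Int) :
    ∀ s1d : List (Int × Int × Int),
      ((s1d.flatMap (fun p => s2d.map (fun q => deltaOf p q))).count d : Int)
        = s1d.countP (fun p => decide ((p.1 - d.1, p.2.1 - d.2.1, p.2.2 - d.2.2) ∈ s2d)) := by
  intro s1d
  induction s1d with
  | nil => simp
  | cons p t ih =>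
    rw [List.flatMap_cons, List.count_append, List.countP_cons]
    push_cast
    rw [count_map_delta p d s2d h2, ih]
    by_cases h : (p.1 - d.1, p.2.1 - d.2.1, p.2.2 - d.2.2) ∈ s2d <;> simp [h] <;> ring

-- B's counter lookup, in closed form
lemma delta_counts_getD (s1 s2 : List (Int × Int × Int)) (d : Int × Int × Int) :
    (delta_counts s1 s2).getD d 0
      = ((PySem.Set.ofList s1).countP
          (fun p => decide ((p.1 - d.1, p.2.1 - d.2.1, p.2.2 - d.2.2) ∈ PySem.Set.ofList s2)) : Int) := by
  unfold delta_counts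
  rw [PySem.Dict.getD_foldl_insert_add_one]
  rw [PySem.Dict.getD_empty]
  rw [count_flatMap_delta _ (PySem.Set.nodup_ofList s2) d]
  simp

-- A's intersection size, in the same closed form
lemma len_inter_eq (s1 s2 : List (Int × Int × Int)) (a b c : Int) :
    PySem.Set.len (PySem.Set.inter (PySem.Set.ofList s1)
        (PySem.Set.ofList (s2.map (fun q => (q.1 + a, q.2.1 + b, q.2.2 + c)))))
      = ((PySem.Set.ofList s1).countP
          (fun p => decide ((p.1 - a, p.2.1 - b, p.2.2 - c) ∈ PySem.Set.ofList s2)) : Int) := by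
  unfold PySem.Set.len PySem.Set.inter
  congr 1
  rw [List.countP_eq_length_filter]
  congr 1
  apply List.filter_congr
  intro p _
  have hm : p ∈ PySem.Set.ofList (s2.map (fun q => (q.1 + a, q.2.1 + b, q.2.2 + c)))
      ↔ (p.1 - a, p.2.1 - b, p.2.2 - c) ∈ PySem.Set.ofList s2 := by
    rw [PySem.Set.mem_ofList, PySem.Set.mem_ofList, List.mem_map]
    constructor
    · rintro ⟨q, hq, rfl⟩
      obtain ⟨x, y, z⟩ := q
      simpa [show x + a - a = x by ring, show y + b - b = y by ring,
             show z + c - c = z by ring] using hq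
    · intro h
      refine ⟨(p.1 - a, p.2.1 - b, p.2.2 - c), h, ?_⟩
      obtain ⟨x, y, z⟩ := p
      simp only [Prod.mk.injEq]
      omega
  rw [Bool.eq_iff_iff]
  simp only [PySem.Set.contains_iff, decide_eq_true_eq]
  exact hm

-- the loop conditions agree pointwise
lemma cond_eq (s1 s2 : List (Int × Int × Int)) (p1 p2 : Int × Int × Int) :
    PySem.Set.len (PySem.Set.inter (PySem.Set.ofList s1)
        (PySem.Set.ofList (shift_scanner s2
          [p1.1 - p2.1, p1.2.1 - p2.2.1, p1.2.2 - p2.2.2])))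
      = (delta_counts s1 s2).getD (deltaOf p1 p2) 0 := by
  rw [shift_scanner_eq_map, len_inter_eq, delta_counts_getD]
  rfl

lemma inner_eq (s1 s2 : List (Int × Int × Int)) (p1 : Int × Int × Int)
    (l : List (Int × Int × Int)) :
    chkA_inner s1 s2 p1 l = chkB_inner (delta_counts s1 s2) s2 p1 l := by
  induction l with
  | nil => rfl
  | cons p2 rest ih =>
    rw [chkA_inner, chkB_inner]
    simp only [← cond_eq s1 s2 p1 p2, shift_scanner_eq_map]
    split
    · rfl
    · exact ih

lemma outer_eq (s1 s2 : List (Int × Int × Int)) (l : List (Int × Int × Int)) :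
    chkA_outer s1 s2 l = chkB_outer (delta_counts s1 s2) s2 l := by
  induction l with
  | nil => rfl
  | cons p1 rest ih =>
    rw [chkA_outer, chkB_outer, inner_eq, ih]

-- ===== VERDICT (by name: the statement is the Claim_ definition above) =====
theorem check_for_transformed_scanner_overlap_spec : Claim_equal_check_for_transformed_scanner_overlap := by
  intro s1 s2 _
  unfold Spec_check_for_transformed_scanner_overlap
  unfold check_for_transformed_scanner_overlap check_for_transformed_scanner_overlap_alt
  rw [outer_eq]
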